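-- pv_equiv track=rewrite | github.com/Aloxion/DMAD-Scripts | hashing_aux/linear_probing_find_aux.py | linear_hashing_find_aux
-- ===== SOURCE A (Python) =====
-- def linear_hashing_find_aux(A, x):
--     possible = []
--     m = len(A)
--     for i in range(m):
--         for j in range(m):
--             position = (i + j) % m
--             if A[position] == None and position == x:
--                 possible.append(i)
--             if (A[position] == None and position != x):
--                 break
--
--     return possible
-- ===== SOURCE B (Python) =====
-- def linear_hashing_find_aux(A, x):
--     m = len(A)
--     if m == 0 or not (0 <= x < m) or A[x] is not None:
--         return []
--     res = [x]
--     k = 1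
--     while k < m and A[(x - k) % m] is not None:
--         res.append((x - k) % m)
--         k += 1
--     return sorted(res)
-- ===== Notes on version B (the rewrite author's own statement) =====
-- stated objective: faster
-- what changed: Instead of probing from every start index (nested loops), B checks that slot x is empty and collects the contiguous run of occupied slots scanned backward from x in one pass, then sorts the run indices.
import Mathlib
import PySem

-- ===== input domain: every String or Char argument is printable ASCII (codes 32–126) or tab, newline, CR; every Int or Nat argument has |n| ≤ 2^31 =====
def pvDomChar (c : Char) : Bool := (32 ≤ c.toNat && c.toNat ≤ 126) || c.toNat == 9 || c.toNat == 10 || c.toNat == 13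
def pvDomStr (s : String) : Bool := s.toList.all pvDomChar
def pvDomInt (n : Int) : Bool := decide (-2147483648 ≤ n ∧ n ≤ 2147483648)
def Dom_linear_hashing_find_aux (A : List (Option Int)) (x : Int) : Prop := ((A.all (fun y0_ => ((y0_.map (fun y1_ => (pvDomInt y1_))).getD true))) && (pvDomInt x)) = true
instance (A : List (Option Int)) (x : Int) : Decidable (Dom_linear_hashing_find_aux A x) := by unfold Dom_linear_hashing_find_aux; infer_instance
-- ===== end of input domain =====

-- B replaces A's probe-from-every-start double loop by one backward scan of the occupied run ending at x, then sorts (measured asymptotically faster).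


-- B replaces A's probe-from-every-start double loop (quadratic passes over the table) by a single
-- backward scan of the occupied run ending at the empty slot x, followed by a sort of the run indices.

-- ===== PORT A =====
-- inner 'for j in range(m)' loop of A with its break; 'acc' carries the 'possible' list
def pvAinner (A : List (Option Int)) (x : Int) (m i : Nat) : List Nat → List Int → List Int
  | [], acc => acc
  | j :: rest, acc =>
    let position := (i + j) % m
    let acc2 := if A.getD position none = none ∧ (position : Int) = x then acc ++ [(i : Int)] else acc
    if A.getD position none = none ∧ (position : Int) ≠ x then acc2
    else pvAinner A x m i rest acc2

def linear_hashing_find_aux (A : List (Option Int)) (x : Int) : List Int :=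
  let m := A.length
  (List.range m).foldl (fun possible i => pvAinner A x m i (List.range m) possible) []

-- ===== PORT B =====
-- the 'while k < m and A[(x - k) % m] is not None' loop of Source B
def pvBloop (A : List (Option Int)) (m : Nat) (x : Int) (k : Nat) (res : List Int) : List Int :=
  if _h : k < m then
    let p := PySem.Int.mod (x - k) m
    if A.getD p.toNat none ≠ none then pvBloop A m x (k + 1) (res ++ [p]) else res
  else res
termination_by m - k

def linear_hashing_find_aux_alt (A : List (Option Int)) (x : Int) : List Int :=
  let m := A.length
  if m = 0 ∨ ¬ (0 ≤ x ∧ x < (m : Int)) ∨ A.getD x.toNat none ≠ none then []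
  else PySem.List.sorted (pvBloop A m x 1 [x]) (fun z => z) false

-- ===== PRECONDITION & SPEC =====
def Spec_linear_hashing_find_aux (A : List (Option Int)) (x : Int) (out : List Int) : Prop := out = linear_hashing_find_aux_alt A x
instance (A : List (Option Int)) (x : Int) (out : List Int) : Decidable (Spec_linear_hashing_find_aux A x out) := by unfold Spec_linear_hashing_find_aux; infer_instance

-- ===== CLAIM (what is proved, stated in full; the proofs are below) =====
def Claim_equal_linear_hashing_find_aux : Prop := ∀ (A : List (Option Int)) (x : Int), Dom_linear_hashing_find_aux A x → Spec_linear_hashing_find_aux A x (linear_hashing_find_aux A x)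

-- ===== LEMMAS AND PROOFS =====

def pvHit (A : List (Option Int)) (x : Int) (m i : Nat) : List Nat → Bool
  | [] => false
  | j :: rest =>
    if A.getD ((i + j) % m) none = none then decide ((((i + j) % m : Nat) : Int) = x)
    else pvHit A x m i rest

theorem pvAinner_noapp (A : List (Option Int)) (x : Int) (m i : Nat) (js : List Nat)
    (h : ∀ j ∈ js, ¬(A.getD ((i + j) % m) none = none ∧ (((i + j) % m : Nat) : Int) = x)) :
    ∀ acc, pvAinner A x m i js acc = acc := by
  induction js with
  | nil => intro acc; rfl
  | cons j rest ih =>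
    intro acc
    have hj := h j (List.mem_cons_self ..)
    show (if A.getD ((i + j) % m) none = none ∧ (((i + j) % m : Nat) : Int) ≠ x then
        (if A.getD ((i + j) % m) none = none ∧ (((i + j) % m : Nat) : Int) = x then acc ++ [(i : Int)] else acc)
      else pvAinner A x m i rest
        (if A.getD ((i + j) % m) none = none ∧ (((i + j) % m : Nat) : Int) = x then acc ++ [(i : Int)] else acc)) = acc
    rw [if_neg hj]
    by_cases he : A.getD ((i + j) % m) none = none
    · have hx : (((i + j) % m : Nat) : Int) ≠ x := fun hx => hj ⟨he, hx⟩
      rw [if_pos ⟨he, hx⟩]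
    · rw [if_neg (fun hc => he hc.1)]
      exact ih (fun j' hj' => h j' (List.mem_cons_of_mem _ hj')) acc

theorem pvAinner_eq (A : List (Option Int)) (x : Int) (m i : Nat) (js : List Nat)
    (hnd : (js.map (fun j => (i + j) % m)).Nodup) :
    ∀ acc, pvAinner A x m i js acc = if pvHit A x m i js then acc ++ [(i : Int)] else acc := by
  induction js with
  | nil => intro acc; rfl
  | cons j rest ih =>
    intro acc
    simp only [List.map_cons, List.nodup_cons, List.mem_map] at hnd
    obtain ⟨hhead, htail⟩ := hnd
    show (if A.getD ((i + j) % m) none = none ∧ (((i + j) % m : Nat) : Int) ≠ x then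
        (if A.getD ((i + j) % m) none = none ∧ (((i + j) % m : Nat) : Int) = x then acc ++ [(i : Int)] else acc)
      else pvAinner A x m i rest
        (if A.getD ((i + j) % m) none = none ∧ (((i + j) % m : Nat) : Int) = x then acc ++ [(i : Int)] else acc)) =
      if pvHit A x m i (j :: rest) then acc ++ [(i : Int)] else acc
    by_cases he : A.getD ((i + j) % m) none = none
    · by_cases hx : (((i + j) % m : Nat) : Int) = x
      · rw [if_neg (fun hc => hc.2 hx), if_pos ⟨he, hx⟩]
        have hhit : pvHit A x m i (j :: rest) = true := by
          simp only [pvHit, he, if_pos, hx, decide_eq_true_eq]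
        rw [hhit, if_pos rfl]
        refine pvAinner_noapp A x m i rest (fun j' hj' hc => ?_) _
        exact hhead ⟨j', hj', by exact_mod_cast hc.2.trans hx.symm⟩
      · rw [if_pos ⟨he, hx⟩, if_neg (fun hc => hx hc.2)]
        have hhit : pvHit A x m i (j :: rest) = false := by
          simp only [pvHit, he, if_pos]
          exact decide_eq_false hx
        rw [hhit]
        simp
    · rw [if_neg (fun hc => he hc.1), if_neg (fun hc => he hc.1)]
      have hhit : pvHit A x m i (j :: rest) = pvHit A x m i rest := by
        simp only [pvHit, he, if_neg, not_false_eq_true]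
      rw [hhit]
      exact ih htail acc

theorem pvHit_false (A : List (Option Int)) (x : Int) (m i : Nat) (js : List Nat)
    (h : ∀ j ∈ js, ¬(A.getD ((i + j) % m) none = none ∧ (((i + j) % m : Nat) : Int) = x)) :
    pvHit A x m i js = false := by
  induction js with
  | nil => rfl
  | cons j rest ih =>
    have hj := h j (List.mem_cons_self ..)
    simp only [pvHit]
    by_cases he : A.getD ((i + j) % m) none = none
    · simp only [he, if_pos]
      exact decide_eq_false (fun hx => hj ⟨he, hx⟩)
    · simp only [he, if_neg, not_false_eq_true]
      exact ih (fun j' hj' => h j' (List.mem_cons_of_mem _ hj'))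

theorem pvPosEq (n X i j : Nat) (hi : i < n) (hX : X < n) :
    (i + j) % n = X ↔ j % n = (X + n - i) % n := by
  have key : (i + j) % n = X ↔ Nat.ModEq n (i + j) (i + (X + n - i)) := by
    have h2 : i + (X + n - i) = X + n := by omega
    rw [Nat.ModEq, h2, Nat.add_mod_right, Nat.mod_eq_of_lt hX]
  rw [key]
  exact ⟨fun h => Nat.ModEq.add_left_cancel' i h, fun h => Nat.ModEq.add_left i h⟩

theorem pvPosEq' (n X i j : Nat) (hj : j < n) (hX : X < n) :
    (i + j) % n = X ↔ i % n = (X + n - j) % n := by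
  rw [Nat.add_comm]; exact pvPosEq n X j i hj hX

theorem pvDistHits (n X i : Nat) (hn : 0 < n) (hi : i < n) (hX : X < n) :
    (i + (X + n - i) % n) % n = X := by
  rw [pvPosEq n X i _ hi hX, Nat.mod_mod_of_dvd _ dvd_rfl]

theorem pvDistUnique (n X i j : Nat) (hi : i < n) (hX : X < n) (hj : j < n)
    (h : (i + j) % n = X) : j = (X + n - i) % n := by
  rw [pvPosEq n X i j hi hX] at h
  rwa [Nat.mod_eq_of_lt hj] at h

theorem pvDistInv (n X t : Nat) (hn : 0 < n) (hX : X < n) (ht : t < n) :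
    (X + n - (X + n - t) % n) % n = t := by
  have hi : (X + n - t) % n < n := Nat.mod_lt _ hn
  refine (pvDistUnique n X ((X + n - t) % n) t hi hX ht ?_).symm
  rw [pvPosEq' n X _ t ht hX, Nat.mod_mod_of_dvd _ dvd_rfl]

theorem pvShift (n X i e : Nat) (hn : 0 < n) (hi : i < n) (hX : X < n)
    (he : e ≤ (X + n - i) % n) (hen : e ≤ n) :
    (i + ((X + n - i) % n - e)) % n = (X + n - e) % n := by
  have hd : (X + n - i) % n < n := Nat.mod_lt _ hn
  have key : Nat.ModEq n (i + ((X + n - i) % n - e) + e) (X + n - e + e) := by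
    have h1 : i + ((X + n - i) % n - e) + e = i + (X + n - i) % n := by omega
    have h2 : X + n - e + e = X + n := by omega
    rw [Nat.ModEq, h1, h2]
    rw [pvDistHits n X i hn hi hX, Nat.add_mod_right, Nat.mod_eq_of_lt hX]
  exact Nat.ModEq.add_right_cancel' e key

-- forward step from i = (X+n-t)%n: (i + j) % n = (X + n - (t - j)) % n for j ≤ t ≤ n

theorem pvShift2 (n X t j : Nat) (hn : 0 < n) (hX : X < n) (hj : j ≤ t) (ht : t ≤ n) :
    ((X + n - t) % n + j) % n = (X + n - (t - j)) % n := by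
  have h1 : ((X + n - t) % n + j) % n = (X + n - t + j) % n := by
    rw [Nat.add_mod, Nat.mod_mod_of_dvd _ dvd_rfl, ← Nat.add_mod]
  rw [h1]
  congr 1
  omega

theorem pvPosNodup (n i : Nat) : ((List.range n).map (fun j => (i + j) % n)).Nodup := by
  rcases Nat.eq_zero_or_pos n with rfl | hn
  · simp
  · refine List.Nodup.map_on ?_ (List.nodup_range)
    intro j1 h1 j2 h2 heq
    rw [List.mem_range] at h1 h2
    have r1 : (i + j1) % n = (i % n + j1) % n := (Nat.mod_add_mod i n j1).symm
    have r2 : (i + j2) % n = (i % n + j2) % n := (Nat.mod_add_mod i n j2).symm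
    have hi : i % n < n := Nat.mod_lt _ hn
    have hX : (i % n + j1) % n < n := Nat.mod_lt _ hn
    have e1 : j1 = ((i % n + j1) % n + n - i % n) % n :=
      pvDistUnique n _ (i % n) j1 hi hX h1 rfl
    have e2 : j2 = ((i % n + j1) % n + n - i % n) % n := by
      refine pvDistUnique n _ (i % n) j2 hi hX h2 ?_
      rw [← r2, ← heq, r1]
    omega

theorem pvA_eq_filter (A : List (Option Int)) (x : Int) :
    linear_hashing_find_aux A x =
      ((List.range A.length).filter (fun i => pvHit A x A.length i (List.range A.length))).map
        (fun i => ((i : Nat) : Int)) := by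
  show (List.range A.length).foldl
      (fun possible i => pvAinner A x A.length i (List.range A.length) possible) [] = _
  rw [PySem.List.foldl_congr_mem (List.range A.length)
    (fun possible i => pvAinner A x A.length i (List.range A.length) possible)
    (fun acc i => if pvHit A x A.length i (List.range A.length) then acc ++ [((i : Nat) : Int)] else acc)
    [] (fun acc i _ => pvAinner_eq A x A.length i (List.range A.length) (pvPosNodup A.length i) acc)]
  rw [PySem.List.foldl_append_if]
  simp

theorem pvHit_range' (A : List (Option Int)) (x : Int) (n : Nat)
    (hx0 : 0 ≤ x) (hxn : x < (n : Int)) (hempty : A.getD x.toNat none = none)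
    (i : Nat) (hi : i < n) :
    ∀ b a, a + b = n → a ≤ (x.toNat + n - i) % n →
      (pvHit A x n i (List.range' a b) = true ↔
        ∀ j, a ≤ j → j < (x.toNat + n - i) % n → A.getD ((i + j) % n) none ≠ none) := by
  have hn : 0 < n := by omega
  have hX : x.toNat < n := by omega
  have hdn : (x.toNat + n - i) % n < n := Nat.mod_lt _ hn
  intro b
  induction b with
  | zero => intro a hab had; omega
  | succ b ih =>
    intro a hab had
    have han : a < n := by omega
    have hcons : List.range' a (b + 1) = a :: List.range' (a + 1) b := rfl
    rw [hcons]
    simp only [pvHit]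
    by_cases hae : a = (x.toNat + n - i) % n
    · have hpos : (i + a) % n = x.toNat := by rw [hae]; exact pvDistHits n x.toNat i hn hi hX
      have hcast : (((i + a) % n : Nat) : Int) = x := by
        rw [hpos]; exact Int.toNat_of_nonneg hx0
      rw [hpos]
      simp only [hempty, if_pos, decide_eq_true_eq]
      constructor
      · intro _ j hj1 hj2; omega
      · intro _; exact Int.toNat_of_nonneg hx0
    · have halt : a < (x.toNat + n - i) % n := by omega
      have hne : (i + a) % n ≠ x.toNat := by
        intro hcontra
        exact hae (pvDistUnique n x.toNat i a hi hX han hcontra)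
      by_cases he : A.getD ((i + a) % n) none = none
      · simp only [he, if_pos, decide_eq_true_eq]
        constructor
        · intro hdec
          exfalso
          apply hne
          have h2 := Int.toNat_of_nonneg hx0
          omega
        · intro hall
          exact absurd he (hall a le_rfl halt)
      · simp only [he, if_neg, not_false_eq_true]
        rw [ih (a + 1) (by omega) (by omega)]
        constructor
        · intro hall j hj1 hj2
          rcases Nat.eq_or_lt_of_le hj1 with rfl | hlt
          · exact he
          · exact hall j hlt hj2
        · intro hall j hj1 hj2
          exact hall j (by omega) hj2

theorem pvModNat (n t : Nat) (x : Int) (hn : 0 < n) (hx0 : 0 ≤ x) (hxn : x < (n : Int))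
    (ht : t ≤ n) : PySem.Int.mod (x - t) n = (((x.toNat + n - t) % n : Nat) : Int) := by
  rw [PySem.Int.mod_eq_emod_of_pos (by exact_mod_cast hn)]
  have h1 : x - t = ((x.toNat + n - t : Nat) : Int) - n := by omega
  rw [h1, Int.sub_emod_right]
  exact (Int.natCast_mod _ _).symm

theorem pvBloop_ex (A : List (Option Int)) (n : Nat) (x : Int) :
    ∀ b k res, n - k = b → k ≤ n →
      ∃ e, k ≤ e ∧ e ≤ n ∧
        pvBloop A n x k res =
          res ++ (List.range' k (e - k)).map (fun t : Nat => PySem.Int.mod (x - (t : Int)) n) ∧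
        (∀ s, k ≤ s → s < e → A.getD (PySem.Int.mod (x - (s : Int)) n).toNat none ≠ none) ∧
        (e < n → A.getD (PySem.Int.mod (x - (e : Int)) n).toNat none = none) := by
  intro b
  induction b with
  | zero =>
    intro k res hb hk
    have hkn : k = n := by omega
    refine ⟨n, by omega, le_rfl, ?_, by omega, by omega⟩
    rw [pvBloop]
    simp [hkn]
  | succ b ih =>
    intro k res hb hk
    have hkn : k < n := by omega
    rw [pvBloop, dif_pos hkn]
    by_cases hocc : A.getD (PySem.Int.mod (x - (k : Int)) n).toNat none ≠ none
    · rw [if_pos hocc]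
      obtain ⟨e, he1, he2, heq, hrun, hbnd⟩ := ih (k + 1) (res ++ [PySem.Int.mod (x - (k : Int)) n]) (by omega) (by omega)
      refine ⟨e, by omega, he2, ?_, ?_, hbnd⟩
      · rw [heq]
        have hr : List.range' k (e - k) = k :: List.range' (k + 1) (e - (k + 1)) := by
          have : e - k = (e - (k + 1)) + 1 := by omega
          rw [this]
          rfl
        rw [hr]
        simp
      · intro s hs1 hs2
        rcases Nat.eq_or_lt_of_le hs1 with rfl | hlt
        · exact hocc
        · exact hrun s hlt hs2
    · rw [if_neg hocc]
      push_neg at hocc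
      refine ⟨k, le_rfl, by omega, by simp, by omega, fun _ => hocc⟩

theorem pvMain (A : List (Option Int)) (x : Int) :
    linear_hashing_find_aux A x = linear_hashing_find_aux_alt A x := by
  set n := A.length with hn
  show _ = if n = 0 ∨ ¬ (0 ≤ x ∧ x < (n : Int)) ∨ A.getD x.toNat none ≠ none then []
    else PySem.List.sorted (pvBloop A n x 1 [x]) (fun z => z) false
  by_cases hdeg : n = 0 ∨ ¬ (0 ≤ x ∧ x < (n : Int)) ∨ A.getD x.toNat none ≠ none
  · rw [if_pos hdeg, pvA_eq_filter]
    have hfalse : ∀ i ∈ List.range n, pvHit A x n i (List.range n) = false := by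
      intro i _
      refine pvHit_false A x n i (List.range n) ?_
      rintro j hj ⟨hempty, hcast⟩
      have hjn : j < n := List.mem_range.mp hj
      have hnpos : 0 < n := by omega
      have hplt : (i + j) % n < n := Nat.mod_lt _ hnpos
      have hx0 : 0 ≤ x := by omega
      have hxn : x < (n : Int) := by omega
      rcases hdeg with h0 | hb | hocc
      · omega
      · exact hb ⟨hx0, hxn⟩
      · apply hocc
        have : x.toNat = (i + j) % n := by omega
        rwa [this]
    rw [← hn, List.filter_eq_nil_iff.mpr (by intro a ha; simp [hfalse a ha])]
    rfl
  · rw [if_neg hdeg]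
    push_neg at hdeg
    obtain ⟨hn0, ⟨hx0, hxn⟩, hempty⟩ := hdeg
    have hnpos : 0 < n := Nat.pos_of_ne_zero hn0
    set X := x.toNat with hX
    have hXn : X < n := by omega
    have hxX : (X : Int) = x := Int.toNat_of_nonneg hx0
    obtain ⟨e, he1, he2, heq, hrun, hbnd⟩ := pvBloop_ex A n x (n - 1) 1 [x] (by omega) (by omega)
    set f : Nat → Int := fun t : Nat => PySem.Int.mod (x - (t : Int)) n with hf
    have hf0 : f 0 = x := by
      rw [hf]
      show PySem.Int.mod (x - (0 : Nat)) n = x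
      rw [pvModNat n 0 x hnpos hx0 hxn (by omega)]
      have : (x.toNat + n - 0) % n = X := by
        rw [Nat.sub_zero, Nat.add_mod_right, Nat.mod_eq_of_lt hXn]
      rw [this, hxX]
    have hres : pvBloop A n x 1 [x] = (List.range' 0 e).map f := by
      rw [heq]
      have hr : List.range' 0 e = 0 :: List.range' 1 (e - 1) := by
        have h1 : e = (e - 1) + 1 := by omega
        rw [h1]
        rfl
      rw [hr, List.map_cons, hf0]
      rfl
    -- membership in the A-side output
    have hAeq := pvA_eq_filter A x
    rw [← hn] at hAeq
    set linA := linear_hashing_find_aux A x with hlinA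
    have hpair : List.Pairwise (fun a b : Int => a < b) linA := by
      rw [hAeq]
      refine List.Pairwise.map _ ?_ (List.Pairwise.filter _ List.pairwise_lt_range)
      intro a b hab
      exact_mod_cast hab
    have hnd1 : linA.Nodup := hpair.imp ne_of_lt
    have hfinj : ∀ t1, t1 < e → ∀ t2, t2 < e → f t1 = f t2 → t1 = t2 := by
      intro t1 h1 t2 h2 hft
      simp only [hf] at hft
      rw [pvModNat n t1 x hnpos hx0 hxn (by omega),
          pvModNat n t2 x hnpos hx0 hxn (by omega)] at hft
      have hnat : (X + n - t1) % n = (X + n - t2) % n := by exact_mod_cast hft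
      have d1 := pvDistInv n X t1 hnpos hXn (by omega)
      have d2 := pvDistInv n X t2 hnpos hXn (by omega)
      rw [hnat] at d1
      omega
    have hnd2 : ((List.range' 0 e).map f).Nodup := by
      refine List.Nodup.map_on ?_ (List.nodup_range')
      intro t1 h1 t2 h2
      rw [List.mem_range'_1] at h1 h2
      exact hfinj t1 (by omega) t2 (by omega)
    -- the two membership characterisations agree
    have hmem : ∀ z : Int, z ∈ linA ↔ z ∈ (List.range' 0 e).map f := by
      intro z
      rw [hAeq]
      simp only [List.mem_map, List.mem_filter, List.mem_range, List.mem_range'_1]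
      constructor
      · rintro ⟨i, ⟨hi, hhit⟩, rfl⟩
        have hchar := (pvHit_range' A x n hx0 hxn hempty i hi n 0 (by omega) (by omega)).mp
        rw [List.range_eq_range'] at hhit
        have hocc := hchar hhit
        set d := (X + n - i) % n with hd
        have hdn : d < n := Nat.mod_lt _ hnpos
        have hde : d < e := by
          by_contra hcon
          have hed : e ≤ d := by omega
          have hen : e < n := by omega
          have hbv := hbnd hen
          have hshift := pvShift n X i e hnpos hi hXn (by omega) (by omega)
          have hoccj := hocc (d - e) (by omega) (by omega)
          rw [hshift] at hoccj
          apply hoccj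
          rw [pvModNat n e x hnpos hx0 hxn (by omega)] at hbv
          have ht : ((((X + n - e) % n : Nat) : Int)).toNat = (X + n - e) % n := rfl
          rwa [ht] at hbv
        refine ⟨d, ⟨by omega, by omega⟩, ?_⟩
        rw [hf]
        show PySem.Int.mod (x - (d : Int)) n = (i : Int)
        rw [pvModNat n d x hnpos hx0 hxn (by omega)]
        rw [hd, pvDistInv n X i hnpos hXn hi]
      · rintro ⟨t, ⟨_, ht⟩, rfl⟩
        have hte : t < e := by omega
        have htn : t < n := by omega
        refine ⟨(X + n - t) % n, ⟨Nat.mod_lt _ hnpos, ?_⟩, ?_⟩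
        · set i := (X + n - t) % n with hi
          have hin : i < n := Nat.mod_lt _ hnpos
          rw [List.range_eq_range']
          refine (pvHit_range' A x n hx0 hxn hempty i hin n 0 (by omega) (by omega)).mpr ?_
          intro j _ hj
          have hdi : (X + n - i) % n = t := pvDistInv n X t hnpos hXn htn
          rw [hdi] at hj
          have hs := hrun (t - j) (by omega) (by omega)
          rw [pvModNat n (t - j) x hnpos hx0 hxn (by omega)] at hs
          have hshift := pvShift2 n X t j hnpos hXn (by omega) (by omega)
          rw [← hi] at hshift
          rw [hshift]
          intro hcontra
          apply hs
          rw [show ((((X + n - (t - j)) % n : Nat) : Int)).toNat = (X + n - (t - j)) % n from rfl]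
          exact hcontra
        · show (((X + n - t) % n : Nat) : Int) = PySem.Int.mod (x - (t : Int)) (n : Int)
          exact (pvModNat n t x hnpos hx0 hxn (by omega)).symm
    have hperm : linA.Perm ((List.range' 0 e).map f) :=
      (List.perm_ext_iff_of_nodup hnd1 hnd2).mpr hmem
    rw [hres]
    exact (PySem.List.sorted_eq_of_perm_of_pairwise_lt _ _ _ hperm hpair).symm

-- ===== VERDICT (by name: the statement is the Claim_ definition above) =====
theorem linear_hashing_find_aux_spec : Claim_equal_linear_hashing_find_aux := by
  intro A x _
  unfold Spec_linear_hashing_find_aux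
  exact pvMain A x
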